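-- pv_equiv track=rewrite | github.com/BBSISK/mathappR15Dev | add_unique_visual_questions.py | svg_circle_set
-- ===== SOURCE A (Python) =====
-- def svg_circle_set(total, shaded, size=200):
--     """Set of circles, some shaded"""
--     cols = min(5, total)
--     rows = (total + cols - 1) // cols
--     r = 20
--     gap = 10
--     width = cols * (2*r + gap) + 20
--     height = rows * (2*r + gap) + 20
--
--     svg = f'<svg width="{width}" height="{height}" viewBox="0 0 {width} {height}">'
--
--     count = 0
--     for row in range(rows):
--         for col in range(cols):
--             if count >= total:
--                 break
--             cx = 10 + r + col * (2*r + gap)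
--             cy = 10 + r + row * (2*r + gap)
--             color = '#8b5cf6' if count < shaded else '#e5e7eb'
--             svg += f'<circle cx="{cx}" cy="{cy}" r="{r}" fill="{color}" stroke="#374151" stroke-width="2"/>'
--             count += 1
--
--     svg += '</svg>'
--     return svg
-- ===== SOURCE B (Python) =====
-- def svg_circle_set(total, shaded, size=200):
--     """Set of circles, some shaded"""
--     cols = min(5, total)
--     rows = (total + cols - 1) // cols
--     r = 20
--     gap = 10
--     step = 2 * r + gap
--     width = cols * step + 20
--     height = rows * step + 20
--
--     # column templates computed once: everything of a circle tag left of its cy value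
--     pre = ['<circle cx="%d" cy="' % (10 + r + c * step) for c in range(cols)]
--     # the two color tails, built once
--     tail_purple = '" r="%d" fill="#8b5cf6" stroke="#374151" stroke-width="2"/>' % r
--     tail_gray = '" r="%d" fill="#e5e7eb" stroke="#374151" stroke-width="2"/>' % r
--
--     # staged passes by color: purple circles are exactly the indices below p
--     p = min(max(shaded, 0), total)
--     parts = ['<svg width="%d" height="%d" viewBox="0 0 %d %d">' % (width, height, width, height)]
--     for i in range(p):
--         parts.append(pre[i % cols] + str(10 + r + (i // cols) * step) + tail_purple)
--     for i in range(p, total):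
--         parts.append(pre[i % cols] + str(10 + r + (i // cols) * step) + tail_gray)
--     parts.append('</svg>')
--     return ''.join(parts)
-- ===== Notes on version B (the rewrite author's own statement) =====
-- stated objective: alternative
-- what changed: Instead of formatting each circle tag in full inside nested loops with a count/break, B precomputes the per-column tag prefixes and the two color tails once, splits the circles into two staged color passes (all purple indices below p = clamped shaded, then all gray ones), and joins the assembled parts; Pre_ excludes total == 0, where both implementations raise ZeroDivisionError.
-- outside the precondition, e.g. on svg_circle_set(0, 0, 200): A raises ZeroDivisionError, B raises ZeroDivisionError
import Mathlib
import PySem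

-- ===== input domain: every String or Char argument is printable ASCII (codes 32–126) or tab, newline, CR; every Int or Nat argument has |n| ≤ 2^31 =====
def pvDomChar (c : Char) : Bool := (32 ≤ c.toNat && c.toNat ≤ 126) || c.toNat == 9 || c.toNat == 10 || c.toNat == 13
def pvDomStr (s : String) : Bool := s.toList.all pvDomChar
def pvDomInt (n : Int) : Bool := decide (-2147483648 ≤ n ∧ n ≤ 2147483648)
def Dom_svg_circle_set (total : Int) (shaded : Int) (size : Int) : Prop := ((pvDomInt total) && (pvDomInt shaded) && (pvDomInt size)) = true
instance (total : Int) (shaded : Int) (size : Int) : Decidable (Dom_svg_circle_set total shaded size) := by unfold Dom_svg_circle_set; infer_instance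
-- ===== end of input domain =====

-- B replaces A's per-circle formatting inside nested loops (count/break, color branch per circle)
-- by precomputed per-column tag prefixes and two fixed color tails, assembled in two staged
-- color passes (purple indices below the clamped shaded count, then the gray rest) and one join
-- (objective: alternative decomposition, same cost).

-- ===== PORT A =====
-- strings are built on List Char (PySem.Chars side) and wrapped with String.mk at the end
-- f-string of one circle (cx/cy computed from the loop's col/row, colour from count)
def aCirc (shaded r gap count col row : Int) : List Char :=
  let cx := 10 + r + col * (2*r + gap)
  let cy := 10 + r + row * (2*r + gap)
  let color : String := if count < shaded then "#8b5cf6" else "#e5e7eb"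
  "<circle cx=\"".toList ++ PySem.Int.toChars cx ++ "\" cy=\"".toList ++ PySem.Int.toChars cy
    ++ "\" r=\"".toList ++ PySem.Int.toChars r ++ "\" fill=\"".toList ++ color.toList
    ++ "\" stroke=\"#374151\" stroke-width=\"2\"/>".toList

-- inner `for col in range(cols)` with the early `break` on count >= total
def aInner (total shaded r gap row : Int) : List Int → Int × List Char → Int × List Char
  | [], st => st
  | col :: rest, (count, svg) =>
    if count ≥ total then (count, svg)
    else aInner total shaded r gap row rest (count + 1, svg ++ aCirc shaded r gap count col row)

-- outer `for row in range(rows)`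
def aOuter (total shaded r gap cols : Int) : List Int → Int × List Char → Int × List Char
  | [], st => st
  | row :: rest, st =>
      aOuter total shaded r gap cols rest (aInner total shaded r gap row (PySem.List.pyRange 0 cols 1) st)

def svg_circle_set (total : Int) (shaded : Int) (size : Int) : String :=
  let cols := min 5 total
  let rows := PySem.Int.floordiv (total + cols - 1) cols
  let r : Int := 20
  let gap : Int := 10
  let width := cols * (2*r + gap) + 20
  let height := rows * (2*r + gap) + 20
  let svg0 := "<svg width=\"".toList ++ PySem.Int.toChars width ++ "\" height=\"".toList
      ++ PySem.Int.toChars height ++ "\" viewBox=\"0 0 ".toList ++ PySem.Int.toChars width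
      ++ " ".toList ++ PySem.Int.toChars height ++ "\">".toList
  let st := aOuter total shaded r gap cols (PySem.List.pyRange 0 rows 1) (0, svg0)
  String.mk (st.2 ++ "</svg>".toList)

-- ===== PORT B =====
-- column template: everything of a circle tag left of its cy value ('<circle cx="%d" cy="' % cx)
def colPre (r gap c : Int) : List Char :=
  "<circle cx=\"".toList ++ PySem.Int.toChars (10 + r + c * (2*r + gap)) ++ "\" cy=\"".toList

-- a color tail ('" r="%d" fill="<color>" stroke="#374151" stroke-width="2"/>' % r)
def tailC (r : Int) (color : String) : List Char :=
  "\" r=\"".toList ++ PySem.Int.toChars r ++ "\" fill=\"".toList ++ color.toList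
    ++ "\" stroke=\"#374151\" stroke-width=\"2\"/>".toList

-- one assembled part: pre[i % cols] + str(cy) + tail  (pyGetD: the index i % cols is always in range)
def bPiece (pre : List (List Char)) (cols r step : Int) (tail : List Char) (i : Int) : List Char :=
  PySem.List.pyGetD pre (PySem.Int.mod i cols) []
    ++ PySem.Int.toChars (10 + r + (PySem.Int.floordiv i cols) * step) ++ tail

def svg_circle_set_alt (total : Int) (shaded : Int) (size : Int) : String :=
  let cols := min 5 total
  let rows := PySem.Int.floordiv (total + cols - 1) cols
  let r : Int := 20
  let gap : Int := 10
  let step := 2*r + gap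
  let width := cols * step + 20
  let height := rows * step + 20
  let pre := (PySem.List.pyRange 0 cols 1).map (colPre r gap)
  let tp := tailC r "#8b5cf6"
  let tg := tailC r "#e5e7eb"
  let p := min (max shaded 0) total
  let header := "<svg width=\"".toList ++ PySem.Int.toChars width ++ "\" height=\"".toList
      ++ PySem.Int.toChars height ++ "\" viewBox=\"0 0 ".toList ++ PySem.Int.toChars width
      ++ " ".toList ++ PySem.Int.toChars height ++ "\">".toList
  let parts := header :: ((PySem.List.pyRange 0 p 1).map (bPiece pre cols r step tp)
      ++ (PySem.List.pyRange p total 1).map (bPiece pre cols r step tg) ++ ["</svg>".toList])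
  String.mk (PySem.Chars.join [] parts)

-- ===== PRECONDITION & SPEC =====
-- total = 0 makes cols = min(5, 0) = 0 and `(total + cols - 1) // cols` raise ZeroDivisionError in A (and in B).
def Pre_svg_circle_set (total : Int) (shaded : Int) (size : Int) : Prop := total ≠ 0
instance (total : Int) (shaded : Int) (size : Int) : Decidable (Pre_svg_circle_set total shaded size) := by unfold Pre_svg_circle_set; infer_instance
def pvWitness_svg_circle_set : Int × Int × Int := (7, 3, 200)

def Spec_svg_circle_set (total : Int) (shaded : Int) (size : Int) (out : String) : Prop := out = svg_circle_set_alt total shaded size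
instance (total : Int) (shaded : Int) (size : Int) (out : String) : Decidable (Spec_svg_circle_set total shaded size out) := by unfold Spec_svg_circle_set; infer_instance

-- ===== CLAIM (what is proved, stated in full; the proofs are below) =====
def Claim_equal_svg_circle_set : Prop := ∀ (total : Int) (shaded : Int) (size : Int), Dom_svg_circle_set total shaded size → Pre_svg_circle_set total shaded size → Spec_svg_circle_set total shaded size (svg_circle_set total shaded size)

-- ===== LEMMAS AND PROOFS =====

-- ''.join on Chars is flatten
theorem join_empty_eq_flatten (l : List (List Char)) : PySem.Chars.join [] l = l.flatten := by
  induction l with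
  | nil => rfl
  | cons x xs ih =>
      cases xs with
      | nil => simp [PySem.Chars.join, List.intercalate]
      | cons y ys =>
          rw [PySem.Chars.join_cons_cons]
          simp only [List.flatten_cons] at *
          rw [ih]; simp

-- proof-side: the circle of index i (col = i % cols, row = i // cols, colour by i < shaded)
def circAt (shaded cols r gap i : Int) : List Char :=
  let col := PySem.Int.mod i cols
  let row := PySem.Int.floordiv i cols
  let cx := 10 + r + col * (2*r + gap)
  let cy := 10 + r + row * (2*r + gap)
  let color : String := if i < shaded then "#8b5cf6" else "#e5e7eb"
  "<circle cx=\"".toList ++ PySem.Int.toChars cx ++ "\" cy=\"".toList ++ PySem.Int.toChars cy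
    ++ "\" r=\"".toList ++ PySem.Int.toChars r ++ "\" fill=\"".toList ++ color.toList
    ++ "\" stroke=\"#374151\" stroke-width=\"2\"/>".toList

-- circles for indices [0, n)
def bF (shaded cols r gap : Int) (n : Nat) : List Char :=
  ((List.range n).map (fun (t : Nat) => circAt shaded cols r gap (t : Int))).flatten

theorem bF_add (shaded cols r gap : Int) (a k : Nat) :
    bF shaded cols r gap (a + k)
      = bF shaded cols r gap a
        ++ ((List.range k).map (fun (t : Nat) => circAt shaded cols r gap ((a : Int) + t))).flatten := by
  unfold bF
  rw [List.range_add, List.map_append, List.flatten_append, List.map_map]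
  congr 1

-- the circle A prints at (row ρ, col j, count c) is index c's circle, when c = ρ*cols + j
theorem aCirc_eq_circAt (shaded cols r gap ρ c : Int) (j : Nat)
    (hc : 0 < cols) (hρ : 0 ≤ ρ) (hj : (j : Int) < cols) (hceq : c = ρ * cols + j) :
    aCirc shaded r gap c (j : Int) ρ = circAt shaded cols r gap c := by
  unfold aCirc circAt
  have hj0 : (0:Int) ≤ j := by positivity
  have hmod : PySem.Int.mod c cols = (j : Int) := by
    rw [PySem.Int.mod_eq_emod_of_pos hc, hceq, add_comm, mul_comm ρ cols, Int.add_mul_emod_self_left]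
    exact Int.emod_eq_of_lt hj0 hj
  have hdiv : PySem.Int.floordiv c cols = ρ := by
    rw [PySem.Int.floordiv_eq_ediv_of_pos hc, hceq, add_comm,
      Int.add_mul_ediv_right _ _ (by omega : cols ≠ 0)]
    rw [Int.ediv_eq_zero_of_lt hj0 hj, zero_add]
  rw [hmod, hdiv]

-- once count has reached total, the inner loop only breaks
theorem aInner_ge (total shaded r gap row : Int) (l : List Int) (c : Int) (svg : List Char)
    (h : c ≥ total) : aInner total shaded r gap row l (c, svg) = (c, svg) := by
  cases l with
  | nil => rfl
  | cons x rest => simp [aInner, h]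

-- inner loop over the column suffix [j, j+m) starting at count c = ρ*cols + j:
-- it emits the circles of indices c, c+1, … and advances count by min m (total-c)⁺
theorem aInner_spec (total shaded r gap cols ρ : Int) (hc : 0 < cols) (hρ : 0 ≤ ρ) :
    ∀ (m j : Nat) (c : Int) (svg : List Char),
      (j : Int) + m ≤ cols → c = ρ * cols + j →
      aInner total shaded r gap ρ ((List.range' j m).map (fun (k : Nat) => (k : Int))) (c, svg)
        = (c + (min m (total - c).toNat : Nat),
           svg ++ ((List.range (min m (total - c).toNat)).map
              (fun (t : Nat) => circAt shaded cols r gap (c + t))).flatten) := by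
  intro m
  induction m with
  | zero => intro j c svg _ _; simp [aInner]
  | succ m ih =>
      intro j c svg hjm hceq
      rw [List.range'_succ]
      simp only [List.map_cons]
      by_cases hct : c ≥ total
      · have h0 : (total - c).toNat = 0 := by omega
        rw [show aInner total shaded r gap ρ ((j:Int) :: (List.range' (j+1) m).map (fun (k : Nat) => (k : Int))) (c, svg)
              = (c, svg) from by simp [aInner, hct]]
        simp [h0]
      · push_neg at hct
        have hstep : aInner total shaded r gap ρ
            ((j:Int) :: (List.range' (j+1) m).map (fun (k : Nat) => (k : Int))) (c, svg)
            = aInner total shaded r gap ρ ((List.range' (j+1) m).map (fun (k : Nat) => (k : Int)))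
                (c + 1, svg ++ aCirc shaded r gap c (j:Int) ρ) := by
          simp [aInner, not_le.mpr hct]
        rw [hstep]
        have hcirc : aCirc shaded r gap c (j:Int) ρ = circAt shaded cols r gap c :=
          aCirc_eq_circAt shaded cols r gap ρ c j hc hρ (by push_cast at hjm ⊢; omega) hceq
        rw [hcirc]
        rw [ih (j+1) (c+1) (svg ++ circAt shaded cols r gap c)
              (by push_cast at hjm ⊢; omega) (by push_cast; omega)]
        have hk : min (m + 1) (total - c).toNat = (min m (total - (c+1)).toNat) + 1 := by omega
        simp only [Prod.mk.injEq]
        refine ⟨?_, ?_⟩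
        · push_cast [hk]; omega
        · rw [hk, List.range_succ_eq_map]
          simp only [List.map_cons, List.map_map, List.flatten_cons, List.append_assoc]
          congr 2
          · simp
          · refine congrArg List.flatten (List.map_congr_left (fun t _ => ?_))
            simp only [Function.comp_apply]
            congr 1
            push_cast; ring

-- outer loop over rows [j, j+m): count goes from min (j*cols) total to min ((j+m)*cols) total
theorem aOuter_spec (total shaded r gap cols : Int) (hc : 0 < cols) (ht : 0 < total) :
    ∀ (m j : Nat) (base : List Char),
      aOuter total shaded r gap cols ((List.range' j m).map (fun (k : Nat) => (k : Int)))
        (min ((j : Int) * cols) total,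
         base ++ bF shaded cols r gap (min ((j : Int) * cols) total).toNat)
      = (min (((j : Int) + m) * cols) total,
         base ++ bF shaded cols r gap (min (((j : Int) + m) * cols) total).toNat) := by
  intro m
  induction m with
  | zero => intro j base; simp [aOuter]
  | succ m ih =>
      intro j base
      rw [List.range'_succ]
      simp only [List.map_cons]
      rw [show ∀ st, aOuter total shaded r gap cols ((j:Int) :: (List.range' (j+1) m).map (fun (k : Nat) => (k : Int))) st
            = aOuter total shaded r gap cols ((List.range' (j+1) m).map (fun (k : Nat) => (k : Int)))
                (aInner total shaded r gap (j:Int) (PySem.List.pyRange 0 cols 1) st) from fun _ => rfl]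
      have hih := ih (j+1) base
      rw [show (((j+1 : Nat) : Int)) + (m : Int) = (j : Int) + ((m+1 : Nat) : Int) from by push_cast; ring] at hih
      by_cases hdone : total ≤ (j : Int) * cols
      · -- count already = total; inner loop only breaks
        have hmin : min ((j:Int) * cols) total = total := by omega
        have hmin' : min (((j+1 : Nat) : Int) * cols) total = total := by
          have h1 : (((j+1 : Nat)) : Int) * cols = (j:Int) * cols + cols := by push_cast; ring
          rw [h1]; exact min_eq_right (by linarith)
        rw [hmin, aInner_ge _ _ _ _ _ _ _ _ (le_refl total)]
        rw [hmin'] at hih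
        exact hih
      · -- count = j*cols < total: run the inner loop via aInner_spec
        push_neg at hdone
        have hmin : min ((j:Int) * cols) total = (j:Int) * cols := by omega
        rw [hmin]
        have hpy : PySem.List.pyRange 0 cols 1 = (List.range' 0 cols.toNat).map (fun (k : Nat) => (k : Int)) := by
          rw [PySem.List.pyRange_one, ← List.range_eq_range']
          simp only [sub_zero]
          exact List.map_congr_left (fun k _ => by simp)
        rw [hpy]
        rw [aInner_spec total shaded r gap cols (j:Int) hc (by positivity) cols.toNat 0 ((j:Int)*cols)
              (base ++ bF shaded cols r gap ((j:Int) * cols).toNat)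
              (by omega) (by simp)]
        set c := (j:Int) * cols with hcdef
        have hcnn : 0 ≤ c := by positivity
        have h1 : (((j+1 : Nat)) : Int) * cols = c + cols := by rw [hcdef]; push_cast; ring
        have hkey : c + ((min cols.toNat (total - c).toNat : Nat) : Int)
            = min (((j+1 : Nat) : Int) * cols) total := by
          rw [h1]; omega
        have hsvg : base ++ bF shaded cols r gap c.toNat
              ++ ((List.range (min cols.toNat (total - c).toNat)).map
                  (fun (t : Nat) => circAt shaded cols r gap (c + t))).flatten
            = base ++ bF shaded cols r gap (min (((j+1 : Nat) : Int) * cols) total).toNat := by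
          rw [List.append_assoc]
          congr 1
          have h2 : (min (((j+1 : Nat) : Int) * cols) total).toNat
              = c.toNat + min cols.toNat (total - c).toNat := by
            rw [h1]; omega
          rw [h2, bF_add]
          congr 1
          refine congrArg List.flatten (List.map_congr_left (fun t _ => ?_))
          congr 1
          omega
        rw [hkey, hsvg, hih]

-- outer loop is the identity when the inner range is empty (negative total: cols = total < 0)
theorem aOuter_nilInner (total shaded r gap cols : Int) (hc : PySem.List.pyRange 0 cols 1 = [])
    (l : List Int) (st : Int × List Char) :
    aOuter total shaded r gap cols l st = st := by
  induction l generalizing st with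
  | nil => rfl
  | cons x rest ih => simp only [aOuter, hc, aInner]; exact ih _

-- B's assembled part at index i is index i's circle, colors matching on each side of shaded
theorem bPiece_purple (shaded cols i : Int) (hc : 0 < cols) (hi : i < shaded) :
    bPiece ((PySem.List.pyRange 0 cols 1).map (colPre 20 10)) cols 20 (2*20 + 10)
      (tailC 20 "#8b5cf6") i = circAt shaded cols 20 10 i := by
  unfold bPiece circAt colPre tailC
  rw [PySem.List.pyGetD_map_pyRange_of_nonneg _ _ _ _ (PySem.Int.mod_nonneg _ hc)
      (PySem.Int.mod_lt _ hc)]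
  simp [hi, List.append_assoc]

theorem bPiece_gray (shaded cols i : Int) (hc : 0 < cols) (hi : ¬ i < shaded) :
    bPiece ((PySem.List.pyRange 0 cols 1).map (colPre 20 10)) cols 20 (2*20 + 10)
      (tailC 20 "#e5e7eb") i = circAt shaded cols 20 10 i := by
  unfold bPiece circAt colPre tailC
  rw [PySem.List.pyGetD_map_pyRange_of_nonneg _ _ _ _ (PySem.Int.mod_nonneg _ hc)
      (PySem.Int.mod_lt _ hc)]
  simp [hi, List.append_assoc]

-- ===== VERDICT (by name: the statement is the Claim_ definition above) =====
theorem svg_circle_set_spec : Claim_equal_svg_circle_set := by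
  intro total shaded size _ hpre
  unfold Spec_svg_circle_set svg_circle_set svg_circle_set_alt
  simp only []
  rcases lt_or_gt_of_ne hpre with hneg | hpos
  · -- total < 0: cols = total < 0, all ranges are empty on both sides
    have hcols : min 5 total = total := by omega
    have hp : min (max shaded 0) total = total := by omega
    have hempty : PySem.List.pyRange 0 total 1 = [] := by
      rw [PySem.List.pyRange_one]; simp; omega
    have hempty2 : PySem.List.pyRange total total 1 = [] := by
      rw [PySem.List.pyRange_one]; simp
    rw [hcols, hp, aOuter_nilInner _ _ _ _ _ hempty, hempty, hempty2]
    simp [join_empty_eq_flatten]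
  · -- total > 0
    set cols := min 5 total with hcolsdef
    have hc : 0 < cols := by omega
    set rows := PySem.Int.floordiv (total + cols - 1) cols with hrowsdef
    set p := min (max shaded 0) total with hpdef
    have hp0 : 0 ≤ p := by omega
    have hpt : p ≤ total := by omega
    -- rows * cols ≥ total and rows ≥ 0, from the floordiv/mod identity
    have hid := PySem.Int.floordiv_mul_add_mod (total + cols - 1) cols
    have hm0 := PySem.Int.mod_nonneg (total + cols - 1) hc
    have hm1 := PySem.Int.mod_lt (total + cols - 1) hc
    have hge : total ≤ rows * cols := by rw [hrowsdef]; omega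
    have hr1 : 0 ≤ rows := by
      rw [hrowsdef]; nlinarith [hid, hm0, hm1]
    have hpy : PySem.List.pyRange 0 rows 1 = (List.range' 0 rows.toNat).map (fun (k : Nat) => (k : Int)) := by
      rw [PySem.List.pyRange_one, ← List.range_eq_range']
      simp only [sub_zero]
      exact List.map_congr_left (fun k _ => by simp)
    rw [hpy]
    have h0 := aOuter_spec total shaded 20 10 cols hc hpos rows.toNat 0
      ("<svg width=\"".toList ++ PySem.Int.toChars (cols * (2*20 + 10) + 20) ++ "\" height=\"".toList
        ++ PySem.Int.toChars (rows * (2*20 + 10) + 20) ++ "\" viewBox=\"0 0 ".toList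
        ++ PySem.Int.toChars (cols * (2*20 + 10) + 20)
        ++ " ".toList ++ PySem.Int.toChars (rows * (2*20 + 10) + 20) ++ "\">".toList)
    have hmin0 : min ((((0:Nat)):Int) * cols) total = 0 := by
      simp only [Nat.cast_zero, zero_mul]; omega
    have hminr : min (((((0:Nat)):Int) + rows.toNat) * cols) total = total := by
      have hrn : ((rows.toNat : Int)) = rows := by omega
      rw [Nat.cast_zero, zero_add, hrn]
      omega
    rw [hmin0] at h0
    rw [hminr] at h0
    simp only [Int.toNat_zero, bF, List.range_zero, List.map_nil, List.flatten_nil,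
      List.append_nil] at h0
    rw [h0]
    -- B's side: join of the parts = header ++ circles of [0, p) ++ circles of [p, total) ++ tail
    rw [join_empty_eq_flatten]
    simp only [List.flatten_cons, List.flatten_append]
    have hrp : PySem.List.pyRange 0 p 1 = (List.range p.toNat).map (fun (k : Nat) => (k : Int)) := by
      rw [PySem.List.pyRange_one]
      simp only [sub_zero]
      exact List.map_congr_left (fun k _ => by simp)
    have hP : ((PySem.List.pyRange 0 p 1).map
          (bPiece ((PySem.List.pyRange 0 cols 1).map (colPre 20 10)) cols 20 (2*20 + 10)
            (tailC 20 "#8b5cf6"))).flatten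
        = bF shaded cols 20 10 p.toNat := by
      rw [hrp, List.map_map]
      unfold bF
      refine congrArg List.flatten (List.map_congr_left (fun t ht => ?_))
      simp only [Function.comp_apply]
      have ht' := List.mem_range.mp ht
      exact bPiece_purple shaded cols t hc (by omega)
    have hG : ((PySem.List.pyRange p total 1).map
          (bPiece ((PySem.List.pyRange 0 cols 1).map (colPre 20 10)) cols 20 (2*20 + 10)
            (tailC 20 "#e5e7eb"))).flatten
        = ((List.range (total - p).toNat).map
            (fun (t : Nat) => circAt shaded cols 20 10 (p + t))).flatten := by
      have hgq : PySem.List.pyRange p total 1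
          = (List.range (total - p).toNat).map (fun (k : Nat) => p + (k : Int)) :=
        PySem.List.pyRange_one p total
      rw [hgq, List.map_map]
      refine congrArg List.flatten (List.map_congr_left (fun t ht => ?_))
      simp only [Function.comp_apply]
      have ht' := List.mem_range.mp ht
      exact bPiece_gray shaded cols (p + t) hc (by omega)
    rw [hP, hG]
    have hsplit : (List.map (fun (t : Nat) => circAt shaded cols 20 10 (t : Int))
          (List.range total.toNat)).flatten
        = bF shaded cols 20 10 p.toNat
          ++ ((List.range (total - p).toNat).map
              (fun (t : Nat) => circAt shaded cols 20 10 (p + t))).flatten := by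
      rw [show (List.map (fun (t : Nat) => circAt shaded cols 20 10 (t : Int))
            (List.range total.toNat)).flatten = bF shaded cols 20 10 total.toNat from rfl]
      have h2 : total.toNat = p.toNat + (total - p).toNat := by omega
      rw [h2, bF_add]
      congr 1
      refine congrArg List.flatten (List.map_congr_left (fun t _ => ?_))
      congr 1
      omega
    rw [hsplit]
    simp [List.append_assoc]
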